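-- pv_equiv track=rewrite | github.com/Pugsy-Explores/AutoStudio | agent_v2/utils/json_extractor.py | _iter_json_object_strings
-- ===== SOURCE A (Python) =====
-- def _iter_json_object_strings(text: str):
--     in_string = False
--     escape = False
--     depth = 0
--     start = -1
--     for i, ch in enumerate(text):
--         if in_string:
--             if escape:
--                 escape = False
--             elif ch == "\\":
--                 escape = True
--             elif ch == '"':
--                 in_string = False
--             continue
--         if ch == '"':
--             in_string = True
--             continue
--         if ch == "{":
--             if depth == 0:
--                 start = i
--             depth += 1
--             continue
--         if ch == "}" and depth > 0:
--             depth -= 1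
--             if depth == 0 and start >= 0:
--                 yield text[start : i + 1]
--                 start = -1
-- ===== SOURCE B (Python) =====
-- def _structural_braces(text):
--     """First pass: positions of '{' / '}' that lie outside JSON strings."""
--     out = []
--     in_string = False
--     escape = False
--     for i, ch in enumerate(text):
--         if in_string:
--             if escape:
--                 escape = False
--             elif ch == "\\":
--                 escape = True
--             elif ch == '"':
--                 in_string = False
--         elif ch == '"':
--             in_string = True
--         elif ch == "{" or ch == "}":
--             out.append((i, ch))
--     return out
--
--
-- def _iter_json_object_strings(text: str):
--     # Second pass: match braces with a stack of open positions; a top-level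
--     # object is complete exactly when the stack empties.
--     stack = []
--     for pos, ch in _structural_braces(text):
--         if ch == "{":
--             stack.append(pos)
--         elif stack:
--             p = stack.pop()
--             if not stack:
--                 yield text[p : pos + 1]
-- ===== Notes on version B (the rewrite author's own statement) =====
-- stated objective: alternative
-- what changed: B replaces A's fused single loop (string state + depth counter + start variable) by two passes: a lexer collecting positions of braces outside strings, then a stack-of-open-positions brace matcher over that brace list that yields a slice whenever the stack empties.
import Mathlib
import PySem

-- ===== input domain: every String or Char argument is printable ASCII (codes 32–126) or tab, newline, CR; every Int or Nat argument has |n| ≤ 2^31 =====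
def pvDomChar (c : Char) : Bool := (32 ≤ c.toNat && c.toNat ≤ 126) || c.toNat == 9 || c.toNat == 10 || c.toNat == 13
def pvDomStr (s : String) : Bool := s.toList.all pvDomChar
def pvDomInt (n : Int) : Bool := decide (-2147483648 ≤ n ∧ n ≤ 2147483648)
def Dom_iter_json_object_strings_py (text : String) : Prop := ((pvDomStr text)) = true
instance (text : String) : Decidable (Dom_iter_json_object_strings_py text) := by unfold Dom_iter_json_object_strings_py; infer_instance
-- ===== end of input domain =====

-- B replaces A's fused single loop (depth counter + start variable) by a brace lexer pass
-- followed by a stack-of-open-positions matcher; alternative decomposition, same cost.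


-- ===== PORT A =====
-- the for-loop of A, one constructor per iteration; state = (in_string, escape, depth, start)
def aGo (text : String) : List (Int × Char) → Bool → Bool → Int → Int → List String
  | [], _, _, _, _ => []
  | (i, ch) :: rest, instr, esc, depth, start =>
    if instr then
      if esc then aGo text rest instr false depth start
      else if ch = '\\' then aGo text rest instr true depth start
      else if ch = '"' then aGo text rest false esc depth start
      else aGo text rest instr esc depth start
    else if ch = '"' then aGo text rest true esc depth start
    else if ch = '{' then
      aGo text rest instr esc (depth + 1) (if depth = 0 then i else start)
    else if ch = '}' ∧ depth > 0 then
      if depth - 1 = 0 ∧ start ≥ 0 then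
        PySem.Str.slice text (some start) (some (i + 1)) :: aGo text rest instr esc (depth - 1) (-1)
      else aGo text rest instr esc (depth - 1) start
    else aGo text rest instr esc depth start

def iter_json_object_strings_py (text : String) : List String :=
  aGo text (PySem.List.enumerate text.toList) false false 0 (-1)

-- ===== PORT B =====
-- first pass (_structural_braces): braces outside strings, with their positions
def bLex : List (Int × Char) → Bool → Bool → List (Int × Char)
  | [], _, _ => []
  | (i, ch) :: rest, instr, esc =>
    if instr then
      if esc then bLex rest instr false
      else if ch = '\\' then bLex rest instr true
      else if ch = '"' then bLex rest false esc
      else bLex rest instr esc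
    else if ch = '"' then bLex rest true esc
    else if ch = '{' ∨ ch = '}' then (i, ch) :: bLex rest instr esc
    else bLex rest instr esc

-- second pass: stack of open-brace positions (head = top of the Python list)
def bMatch (text : String) : List (Int × Char) → List Int → List String
  | [], _ => []
  | (pos, ch) :: rest, stack =>
    if ch = '{' then bMatch text rest (pos :: stack)
    else
      match stack with
      | [] => bMatch text rest []
      | p :: st' =>
        if st' = [] then PySem.Str.slice text (some p) (some (pos + 1)) :: bMatch text rest st'
        else bMatch text rest st'

def iter_json_object_strings_py_alt (text : String) : List String :=
  bMatch text (bLex (PySem.List.enumerate text.toList) false false) []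

-- ===== PRECONDITION & SPEC =====
def Spec_iter_json_object_strings_py (text : String) (out : List String) : Prop := out = iter_json_object_strings_py_alt text
instance (text : String) (out : List String) : Decidable (Spec_iter_json_object_strings_py text out) := by unfold Spec_iter_json_object_strings_py; infer_instance

-- ===== CLAIM (what is proved, stated in full; the proofs are below) =====
def Claim_equal_iter_json_object_strings_py : Prop := ∀ (text : String), Dom_iter_json_object_strings_py text → Spec_iter_json_object_strings_py text (iter_json_object_strings_py text)

-- ===== LEMMAS AND PROOFS =====

-- A's `start` variable, reconstructed from B's stack: the bottom of the stack, or -1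
def startOf (st : List Int) : Int := st.getLastD (-1)

theorem startOf_cons (p : Int) (st : List Int) :
    startOf (p :: st) = if st = [] then p else startOf st := by
  cases st <;> simp [startOf]


theorem aGo_eq_bMatch (text : String) (cs : List (Int × Char)) :
    ∀ (instr esc : Bool) (st : List Int), (∀ p ∈ st, 0 ≤ p) → (∀ q ∈ cs, 0 ≤ q.1) →
    aGo text cs instr esc (st.length : Int) (startOf st) = bMatch text (bLex cs instr esc) st := by
  induction cs with
  | nil => intro instr esc st _ _; simp [aGo, bLex, bMatch]
  | cons q rest ih =>
    intro instr esc st hst hcs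
    obtain ⟨i, ch⟩ := q
    have hi : 0 ≤ i := hcs (i, ch) (by simp)
    have hrest : ∀ q ∈ rest, 0 ≤ q.1 := fun q hq => hcs q (by simp [hq])
    cases instr with
    | true =>
      cases esc with
      | true => simpa [aGo, bLex] using ih true false st hst hrest
      | false =>
        by_cases hbs : ch = '\\'
        · simpa [aGo, bLex, hbs] using ih true true st hst hrest
        · by_cases hq : ch = '"'
          · simpa [aGo, bLex, hq, hbs] using ih false false st hst hrest
          · simpa [aGo, bLex, hq, hbs] using ih true false st hst hrest
    | false =>
      by_cases hq : ch = '"'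
      · simpa [aGo, bLex, hq] using ih true esc st hst hrest
      · by_cases hob : ch = '{'
        · subst hob
          cases st with
          | nil =>
            simpa [aGo, bLex, bMatch, startOf] using ih false esc [i] (by simpa using hi) hrest
          | cons p st' =>
            have hmem : ∀ x ∈ (i :: p :: st' : List Int), 0 ≤ x := by
              intro x hx
              rcases List.mem_cons.1 hx with rfl | hx
              · exact hi
              · exact hst x hx
            have h := ih false esc (i :: p :: st') hmem hrest
            rw [startOf_cons, if_neg (by simp)] at h
            simp only [aGo, bLex, List.length_cons] at h ⊢
            push_cast at h ⊢
            simpa [show ¬((st'.length : Int) + 1 = 0) by omega] using h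
        · by_cases hcb : ch = '}'
          · subst hcb
            cases st with
            | nil =>
              simpa [aGo, bLex, bMatch, startOf] using ih false esc [] (by simp) hrest
            | cons p st' =>
              cases st' with
              | nil =>
                have hp : (0:Int) ≤ p := hst p (by simp)
                have h := ih false esc [] (by simp) hrest
                simpa [aGo, bLex, bMatch, startOf, hp] using h
              | cons p2 st'' =>
                have h := ih false esc (p2 :: st'') (fun x hx => hst x (List.mem_cons_of_mem _ hx)) hrest
                rw [show startOf (p2 :: st'') = startOf (p :: p2 :: st'') by rw [startOf_cons p]; simp] at h
                simp only [aGo, bLex, List.length_cons] at h ⊢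
                push_cast at h ⊢
                simpa [bMatch, show (0:Int) < (st''.length : Int) + 1 + 1 by omega,
                       show ¬((st''.length : Int) + 1 + 1 - 1 = 0) by omega,
                       show (st''.length : Int) + 1 + 1 - 1 = (st''.length : Int) + 1 by ring] using h
          · simpa [aGo, bLex, hq, hob, hcb] using ih false esc st hst hrest

-- ===== VERDICT (by name: the statement is the Claim_ definition above) =====
theorem iter_json_object_strings_py_spec : Claim_equal_iter_json_object_strings_py := by
  intro text _
  unfold Spec_iter_json_object_strings_py iter_json_object_strings_py iter_json_object_strings_py_alt
  have h := aGo_eq_bMatch text (PySem.List.enumerate text.toList) false false [] (by simp)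
    (by intro q hq
        rw [PySem.List.mem_enumerate_iff] at hq
        obtain ⟨k, hk, rfl⟩ := hq
        simp)
  simpa [startOf] using h
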